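-- pv_equiv track=rewrite | github.com/ilykafae/escape-the-basement | maze.py | _farthest_floor_tile
-- ===== SOURCE A (Python) =====
-- from collections import deque
-- from typing import List, Tuple
--
-- def _bfs_dist(tiles: List[List[int]], start: Tuple[int, int]) -> List[List[int]]:
--     """BFS distances on the tile grid (4-neighbor). Unreachable = large number."""
--     H, W_ = len(tiles), len(tiles[0])
--     INF = 10**9
--     dist = [[INF for _ in range(W_)] for _ in range(H)]
--     sx, sy = start
--
--     q = deque([(sx, sy)])
--     dist[sy][sx] = 0
--
--     while q:
--         x, y = q.popleft()
--         nd = dist[y][x] + 1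
--         for dx, dy in ((1, 0), (-1, 0), (0, 1), (0, -1)):
--             nx, ny = x + dx, y + dy
--             if 0 <= nx < W_ and 0 <= ny < H and tiles[ny][nx] != 1 and dist[ny][nx] > nd:
--                 dist[ny][nx] = nd
--                 q.append((nx, ny))
--
--     return dist
--
-- def _farthest_floor_tile(
--     tiles: List[List[int]],
--     from_pos: Tuple[int, int],
--     min_distance: int = 0,
-- ) -> Tuple[int, int]:
--     """Pick a floor tile far from from_pos. If min_distance can't be met, pick the farthest."""
--     dist = _bfs_dist(tiles, from_pos)
--
--     best = from_pos
--     bestd = -1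
--
--     for y, row in enumerate(dist):
--         for x, d in enumerate(row):
--             if tiles[y][x] == 1 or d >= 10**9:
--                 continue
--             # Prefer tiles that meet the min distance, otherwise just maximize distance.
--             if d >= min_distance and d > bestd:
--                 bestd = d
--                 best = (x, y)
--
--     if bestd >= 0:
--         return best
--
--     # Fallback: no tiles meet min_distance (tiny maze). Return absolute farthest.
--     for y, row in enumerate(dist):
--         for x, d in enumerate(row):
--             if tiles[y][x] != 1 and d < 10**9 and d > bestd:
--                 bestd = d
--                 best = (x, y)
--
--     return best
-- ===== SOURCE B (Python) =====
-- from collections import deque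
-- from typing import List, Tuple
--
-- def _bfs_dist(tiles: List[List[int]], start: Tuple[int, int]) -> List[List[int]]:
--     """BFS distances on the tile grid (4-neighbor). Unreachable = large number."""
--     H, W_ = len(tiles), len(tiles[0])
--     INF = 10**9
--     dist = [[INF for _ in range(W_)] for _ in range(H)]
--     sx, sy = start
--
--     q = deque([(sx, sy)])
--     dist[sy][sx] = 0
--
--     while q:
--         x, y = q.popleft()
--         nd = dist[y][x] + 1
--         for dx, dy in ((1, 0), (-1, 0), (0, 1), (0, -1)):
--             nx, ny = x + dx, y + dy
--             if 0 <= nx < W_ and 0 <= ny < H and tiles[ny][nx] != 1 and dist[ny][nx] > nd: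
--                 dist[ny][nx] = nd
--                 q.append((nx, ny))
--
--     return dist
--
-- def _farthest_floor_tile(
--     tiles: List[List[int]],
--     from_pos: Tuple[int, int],
--     min_distance: int = 0,
-- ) -> Tuple[int, int]:
--     """Pick a floor tile far from from_pos. If min_distance can't be met, pick the farthest.
--
--     Single row-major pass over the BFS grid maintaining two candidates at once:
--     (best, bestd) among tiles meeting min_distance, (allbest, allbestd) among all
--     reachable floor tiles; strict improvement keeps row-major tie-breaking.
--     """
--     dist = _bfs_dist(tiles, from_pos)
--
--     best, bestd = from_pos, -1
--     allbest, allbestd = from_pos, -1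
--
--     for y, row in enumerate(dist):
--         for x, d in enumerate(row):
--             if tiles[y][x] == 1 or d >= 10**9:
--                 continue
--             if d > allbestd:
--                 allbestd, allbest = d, (x, y)
--             if d >= min_distance and d > bestd:
--                 bestd, best = d, (x, y)
--
--     return best if bestd >= 0 else allbest
-- ===== Notes on version B (the rewrite author's own statement) =====
-- stated objective: simpler
-- what changed: The BFS grid is kept, but A's two sequential full-grid scans (min_distance pass, then a fallback pass over all reachable floor tiles) are replaced by one row-major pass maintaining both candidates simultaneously, picking between them at the end.
-- outside the precondition, e.g. on _farthest_floor_tile([], (0, 0), 0): A raises IndexError, B raises IndexError; on _farthest_floor_tile([[0, 0], []], (0, 0), 0): A raises IndexError, B raises IndexError; on _farthest_floor_tile([[0]], (2, 0), 0): A raises IndexError, B raises IndexError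
import Mathlib
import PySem

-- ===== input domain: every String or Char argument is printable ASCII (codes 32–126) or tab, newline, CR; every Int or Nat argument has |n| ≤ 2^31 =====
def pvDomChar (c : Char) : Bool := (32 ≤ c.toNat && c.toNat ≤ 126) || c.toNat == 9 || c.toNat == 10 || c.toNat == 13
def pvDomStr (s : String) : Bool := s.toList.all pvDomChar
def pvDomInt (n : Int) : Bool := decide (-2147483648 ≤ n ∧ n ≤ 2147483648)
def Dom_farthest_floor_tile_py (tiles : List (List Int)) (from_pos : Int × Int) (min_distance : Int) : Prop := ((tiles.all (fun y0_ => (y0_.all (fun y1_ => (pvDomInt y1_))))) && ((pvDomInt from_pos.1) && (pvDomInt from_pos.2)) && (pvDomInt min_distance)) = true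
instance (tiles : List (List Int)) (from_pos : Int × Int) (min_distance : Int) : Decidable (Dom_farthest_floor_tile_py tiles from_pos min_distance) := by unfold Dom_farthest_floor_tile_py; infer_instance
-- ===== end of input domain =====

-- ===== PORT A =====
-- B changes only the candidate scan: A's two sequential grid scans become one pass keeping
-- two candidates.  (Header objective: simpler decomposition; no speed claim.)
-- Shared helper: port of _bfs_dist, a helper both Source A and Source B define verbatim.
-- The 'while q' loop is fuel-bounded structural recursion (fuel is never exhausted on inputs
-- satisfying Pre_: each enqueue strictly decreases one nonnegative dist cell from at most 10^9);
-- pyGetD/pySetD are exact for in-range (possibly negative) indices, guaranteed by Pre_.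
def bfsLoop (tiles : List (List Int)) (W H : Int) :
    Nat → List (Int × Int) → List (List Int) → List (List Int)
  | 0, _, dist => dist
  | _ + 1, [], dist => dist
  | fuel + 1, (x, y) :: q, dist =>
    let nd := PySem.List.pyGetD (PySem.List.pyGetD dist y []) x 0 + 1
    let s := [((1 : Int), (0 : Int)), (-1, 0), (0, 1), (0, -1)].foldl
      (fun (s : List (Int × Int) × List (List Int)) dxy =>
        let nx := x + dxy.1
        let ny := y + dxy.2
        if 0 ≤ nx ∧ nx < W ∧ 0 ≤ ny ∧ ny < H ∧
            PySem.List.pyGetD (PySem.List.pyGetD tiles ny []) nx 1 ≠ 1 ∧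
            PySem.List.pyGetD (PySem.List.pyGetD s.2 ny []) nx 0 > nd then
          (s.1 ++ [(nx, ny)],
           PySem.List.pySetD s.2 ny (PySem.List.pySetD (PySem.List.pyGetD s.2 ny []) nx nd))
        else s)
      (q, dist)
    bfsLoop tiles W H fuel s.1 s.2

def bfsDist (tiles : List (List Int)) (start : Int × Int) : List (List Int) :=
  let H : Int := tiles.length
  let W : Int := (tiles.headD []).length
  let dist0 : List (List Int) :=
    List.replicate tiles.length (List.replicate (tiles.headD []).length ((10 : Int) ^ 9))
  let dist1 := PySem.List.pySetD dist0 start.2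
    (PySem.List.pySetD (PySem.List.pyGetD dist0 start.2 []) start.1 0)
  bfsLoop tiles W H (tiles.length * (tiles.headD []).length * 1000000000 + 2)
    [(start.1, start.2)] dist1

def farthest_floor_tile_py (tiles : List (List Int)) (from_pos : Int × Int) (min_distance : Int) : Int × Int :=
  let dist := bfsDist tiles from_pos
  -- pass 1: floor tiles with finite distance that meet min_distance
  let s1 := (PySem.List.enumerate dist 0).foldl
    (fun (s : (Int × Int) × Int) (yrow : Int × List Int) =>
      (PySem.List.enumerate yrow.2 0).foldl
        (fun (s : (Int × Int) × Int) (xd : Int × Int) =>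
          if PySem.List.pyGetD (PySem.List.pyGetD tiles yrow.1 []) xd.1 1 = 1 ∨ xd.2 ≥ 10 ^ 9 then s
          else if xd.2 ≥ min_distance ∧ xd.2 > s.2 then ((xd.1, yrow.1), xd.2) else s)
        s)
    (from_pos, -1)
  if s1.2 ≥ 0 then s1.1
  else
    -- fallback pass: absolute farthest reachable floor tile
    ((PySem.List.enumerate dist 0).foldl
      (fun (s : (Int × Int) × Int) (yrow : Int × List Int) =>
        (PySem.List.enumerate yrow.2 0).foldl
          (fun (s : (Int × Int) × Int) (xd : Int × Int) =>
            if PySem.List.pyGetD (PySem.List.pyGetD tiles yrow.1 []) xd.1 1 ≠ 1 ∧ xd.2 < 10 ^ 9 ∧ xd.2 > s.2 then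
              ((xd.1, yrow.1), xd.2)
            else s)
          s)
      (from_pos, -1)).1

-- ===== PORT B =====
-- one row-major pass; state = ((best, bestd), (allbest, allbestd))
def farthest_floor_tile_py_alt (tiles : List (List Int)) (from_pos : Int × Int) (min_distance : Int) : Int × Int :=
  let dist := bfsDist tiles from_pos
  let s := (PySem.List.enumerate dist 0).foldl
    (fun (s : ((Int × Int) × Int) × ((Int × Int) × Int)) (yrow : Int × List Int) =>
      (PySem.List.enumerate yrow.2 0).foldl
        (fun (s : ((Int × Int) × Int) × ((Int × Int) × Int)) (xd : Int × Int) =>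
          if PySem.List.pyGetD (PySem.List.pyGetD tiles yrow.1 []) xd.1 1 = 1 ∨ xd.2 ≥ 10 ^ 9 then s
          else
            let sAll := if xd.2 > s.2.2 then ((xd.1, yrow.1), xd.2) else s.2
            let sMin := if xd.2 ≥ min_distance ∧ xd.2 > s.1.2 then ((xd.1, yrow.1), xd.2) else s.1
            (sMin, sAll))
        s)
    ((from_pos, -1), (from_pos, -1))
  if s.1.2 ≥ 0 then s.1.1 else s.2.1

-- ===== PRECONDITION & SPEC =====
-- Pre_ excludes exactly the inputs where A raises IndexError: an empty grid, a row shorter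
-- than row 0 (the scan indexes tiles[y][x] for every x < len(tiles[0])), or a start position
-- outside Python's (negative-wrapping) index range of the grid.
def Pre_farthest_floor_tile_py (tiles : List (List Int)) (from_pos : Int × Int) (min_distance : Int) : Prop :=
  tiles ≠ [] ∧ (∀ row ∈ tiles, (tiles.headD []).length ≤ row.length) ∧
  PySem.Raise.InRange (tiles.headD []).length from_pos.1 ∧
  PySem.Raise.InRange tiles.length from_pos.2

instance (tiles : List (List Int)) (from_pos : Int × Int) (min_distance : Int) : Decidable (Pre_farthest_floor_tile_py tiles from_pos min_distance) := by
  unfold Pre_farthest_floor_tile_py; infer_instance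

def pvWitness_farthest_floor_tile_py : List (List Int) × (Int × Int) × Int :=
  ([[0, 0], [0, 1]], (0, 0), 1)

def Spec_farthest_floor_tile_py (tiles : List (List Int)) (from_pos : Int × Int) (min_distance : Int) (out : Int × Int) : Prop := out = farthest_floor_tile_py_alt tiles from_pos min_distance
instance (tiles : List (List Int)) (from_pos : Int × Int) (min_distance : Int) (out : Int × Int) : Decidable (Spec_farthest_floor_tile_py tiles from_pos min_distance out) := by unfold Spec_farthest_floor_tile_py; infer_instance

-- ===== CLAIM (what is proved, stated in full; the proofs are below) =====
def Claim_equal_farthest_floor_tile_py : Prop := ∀ (tiles : List (List Int)) (from_pos : Int × Int) (min_distance : Int), Dom_farthest_floor_tile_py tiles from_pos min_distance → Pre_farthest_floor_tile_py tiles from_pos min_distance → Spec_farthest_floor_tile_py tiles from_pos min_distance (farthest_floor_tile_py tiles from_pos min_distance)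

-- ===== LEMMAS AND PROOFS =====

-- B's inner fold computes, componentwise, A's pass-1 inner fold and A's fallback inner fold.
lemma inner_eq (tiles : List (List Int)) (min_distance y : Int)
    (L : List (Int × Int)) (b a : (Int × Int) × Int) :
    L.foldl
        (fun (s : ((Int × Int) × Int) × ((Int × Int) × Int)) (xd : Int × Int) =>
          if PySem.List.pyGetD (PySem.List.pyGetD tiles y []) xd.1 1 = 1 ∨ xd.2 ≥ 10 ^ 9 then s
          else
            let sAll := if xd.2 > s.2.2 then ((xd.1, y), xd.2) else s.2
            let sMin := if xd.2 ≥ min_distance ∧ xd.2 > s.1.2 then ((xd.1, y), xd.2) else s.1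
            (sMin, sAll))
        (b, a)
      = (L.foldl
          (fun (s : (Int × Int) × Int) (xd : Int × Int) =>
            if PySem.List.pyGetD (PySem.List.pyGetD tiles y []) xd.1 1 = 1 ∨ xd.2 ≥ 10 ^ 9 then s
            else if xd.2 ≥ min_distance ∧ xd.2 > s.2 then ((xd.1, y), xd.2) else s)
          b,
         L.foldl
          (fun (s : (Int × Int) × Int) (xd : Int × Int) =>
            if PySem.List.pyGetD (PySem.List.pyGetD tiles y []) xd.1 1 ≠ 1 ∧ xd.2 < 10 ^ 9 ∧ xd.2 > s.2 then
              ((xd.1, y), xd.2)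
            else s)
          a) := by
  induction L generalizing b a with
  | nil => rfl
  | cons c L ih =>
    simp only [List.foldl_cons]
    rw [show (if PySem.List.pyGetD (PySem.List.pyGetD tiles y []) c.1 1 = 1 ∨ c.2 ≥ 10 ^ 9 then (b, a)
        else
          let sAll := if c.2 > a.2 then ((c.1, y), c.2) else a
          let sMin := if c.2 ≥ min_distance ∧ c.2 > b.2 then ((c.1, y), c.2) else b
          (sMin, sAll))
      = ((if PySem.List.pyGetD (PySem.List.pyGetD tiles y []) c.1 1 = 1 ∨ c.2 ≥ 10 ^ 9 then b
          else if c.2 ≥ min_distance ∧ c.2 > b.2 then ((c.1, y), c.2) else b),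
         (if PySem.List.pyGetD (PySem.List.pyGetD tiles y []) c.1 1 ≠ 1 ∧ c.2 < 10 ^ 9 ∧ c.2 > a.2 then
            ((c.1, y), c.2)
          else a)) from by split_ifs <;> simp_all <;> omega]
    exact ih _ _

-- the same statement one level up, over the enumerated rows of the distance grid
lemma outer_eq (tiles : List (List Int)) (min_distance : Int)
    (L : List (Int × List Int)) (b a : (Int × Int) × Int) :
    L.foldl
        (fun (s : ((Int × Int) × Int) × ((Int × Int) × Int)) (yrow : Int × List Int) =>
          (PySem.List.enumerate yrow.2 0).foldl
            (fun (s : ((Int × Int) × Int) × ((Int × Int) × Int)) (xd : Int × Int) =>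
              if PySem.List.pyGetD (PySem.List.pyGetD tiles yrow.1 []) xd.1 1 = 1 ∨ xd.2 ≥ 10 ^ 9 then s
              else
                let sAll := if xd.2 > s.2.2 then ((xd.1, yrow.1), xd.2) else s.2
                let sMin := if xd.2 ≥ min_distance ∧ xd.2 > s.1.2 then ((xd.1, yrow.1), xd.2) else s.1
                (sMin, sAll))
            s)
        (b, a)
      = (L.foldl
          (fun (s : (Int × Int) × Int) (yrow : Int × List Int) =>
            (PySem.List.enumerate yrow.2 0).foldl
              (fun (s : (Int × Int) × Int) (xd : Int × Int) =>
                if PySem.List.pyGetD (PySem.List.pyGetD tiles yrow.1 []) xd.1 1 = 1 ∨ xd.2 ≥ 10 ^ 9 then s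
                else if xd.2 ≥ min_distance ∧ xd.2 > s.2 then ((xd.1, yrow.1), xd.2) else s)
              s)
          b,
         L.foldl
          (fun (s : (Int × Int) × Int) (yrow : Int × List Int) =>
            (PySem.List.enumerate yrow.2 0).foldl
              (fun (s : (Int × Int) × Int) (xd : Int × Int) =>
                if PySem.List.pyGetD (PySem.List.pyGetD tiles yrow.1 []) xd.1 1 ≠ 1 ∧ xd.2 < 10 ^ 9 ∧ xd.2 > s.2 then
                  ((xd.1, yrow.1), xd.2)
                else s)
              s)
          a) := by
  induction L generalizing b a with
  | nil => rfl
  | cons c L ih =>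
    simp only [List.foldl_cons]
    rw [inner_eq]
    exact ih _ _

-- ===== VERDICT (by name: the statement is the Claim_ definition above) =====
theorem farthest_floor_tile_py_spec : Claim_equal_farthest_floor_tile_py := by
  intro tiles from_pos min_distance _ _
  show farthest_floor_tile_py tiles from_pos min_distance = farthest_floor_tile_py_alt tiles from_pos min_distance
  unfold farthest_floor_tile_py farthest_floor_tile_py_alt
  simp only [outer_eq]
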